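-- pv_equiv track=rewrite | github.com/edenkim9741/Reinforcement-Learning | cleanrl/cleanrl/ppo_chess_vs_stockfish.py | get_queen_dir
-- ===== SOURCE A (Python) =====
-- from typing import Optional, Tuple, List
--
-- def sign(v: int) -> int:
--     return -1 if v < 0 else (1 if v > 0 else 0)
--
-- def get_queen_dir(diff: Tuple[int, int]) -> Tuple[int, int]:
--     dx, dy = diff
--     magnitude = max(abs(dx), abs(dy)) - 1
--     counter = 0
--     for x in range(-1, 2):
--         for y in range(-1, 2):
--             if x == 0 and y == 0:
--                 continue
--             if x == sign(dx) and y == sign(dy):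
--                 return magnitude, counter
--             counter += 1
--     return 0, 0
-- ===== SOURCE B (Python) =====
-- def get_queen_dir(diff):
--     dx, dy = diff
--     sx = (dx > 0) - (dx < 0)
--     sy = (dy > 0) - (dy < 0)
--     if sx == 0 and sy == 0:
--         return 0, 0
--     magnitude = max(abs(dx), abs(dy)) - 1
--     idx = (sx + 1) * 3 + (sy + 1)
--     if idx > 4:
--         idx -= 1
--     return magnitude, idx
-- ===== Notes on version B (the rewrite author's own statement) =====
-- stated objective: simpler
-- what changed: Replaces the 3x3 nested scan with a counter by a closed-form index (sx+1)*3+(sy+1), minus one past the skipped center cell.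
import Mathlib
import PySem

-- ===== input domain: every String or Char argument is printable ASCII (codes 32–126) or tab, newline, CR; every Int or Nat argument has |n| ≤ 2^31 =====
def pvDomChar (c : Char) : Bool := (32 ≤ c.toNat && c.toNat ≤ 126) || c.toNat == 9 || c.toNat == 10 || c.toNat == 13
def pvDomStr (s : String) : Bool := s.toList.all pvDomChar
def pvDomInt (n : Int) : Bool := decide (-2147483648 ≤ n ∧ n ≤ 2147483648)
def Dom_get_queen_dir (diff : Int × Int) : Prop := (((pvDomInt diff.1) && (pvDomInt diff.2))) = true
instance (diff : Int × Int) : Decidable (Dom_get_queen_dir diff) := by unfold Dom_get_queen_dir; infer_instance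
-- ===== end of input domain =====

-- B replaces A's nested 3x3 scan with a closed-form direction index; simpler, same values everywhere.

-- ===== PORT A =====
def pySign (v : Int) : Int := if v < 0 then -1 else if v > 0 then 1 else 0

-- the nested 'for x … for y …' loop with early return, over the flattened cell list, carrying 'counter'
def loopA (dx dy magnitude : Int) : List (Int × Int) → Int → Int × Int
  | [], _ => (0, 0)
  | (x, y) :: rest, counter =>
    if x = 0 ∧ y = 0 then loopA dx dy magnitude rest counter
    else if x = pySign dx ∧ y = pySign dy then (magnitude, counter)
    else loopA dx dy magnitude rest (counter + 1)

def get_queen_dir (diff : Int × Int) : Int × Int :=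
  let dx := diff.1
  let dy := diff.2
  let magnitude := max |dx| |dy| - 1
  loopA dx dy magnitude
    ((PySem.List.pyRange (-1) 2 1).flatMap fun x =>
      (PySem.List.pyRange (-1) 2 1).map fun y => (x, y)) 0

-- ===== PORT B =====
def get_queen_dir_alt (diff : Int × Int) : Int × Int :=
  let dx := diff.1
  let dy := diff.2
  let sx : Int := (if dx > 0 then 1 else 0) - (if dx < 0 then 1 else 0)
  let sy : Int := (if dy > 0 then 1 else 0) - (if dy < 0 then 1 else 0)
  if sx = 0 ∧ sy = 0 then (0, 0)
  else
    let magnitude := max |dx| |dy| - 1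
    let idx := (sx + 1) * 3 + (sy + 1)
    (magnitude, if idx > 4 then idx - 1 else idx)

-- ===== PRECONDITION & SPEC =====
def Spec_get_queen_dir (diff : Int × Int) (out : Int × Int) : Prop := out = get_queen_dir_alt diff
instance (diff : Int × Int) (out : Int × Int) : Decidable (Spec_get_queen_dir diff out) := by unfold Spec_get_queen_dir; infer_instance

-- ===== CLAIM (what is proved, stated in full; the proofs are below) =====
def Claim_equal_get_queen_dir : Prop := ∀ (diff : Int × Int), Dom_get_queen_dir diff → Spec_get_queen_dir diff (get_queen_dir diff)

-- ===== LEMMAS AND PROOFS =====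

lemma cells_eval :
    ((PySem.List.pyRange (-1) 2 1).flatMap fun x =>
      (PySem.List.pyRange (-1) 2 1).map fun y => ((x : Int), (y : Int))) =
    [(-1,-1),(-1,0),(-1,1),(0,-1),(0,0),(0,1),(1,-1),(1,0),(1,1)] := by
  decide

lemma sign_cases (v : Int) : pySign v = -1 ∨ pySign v = 0 ∨ pySign v = 1 := by
  unfold pySign; split_ifs <;> simp

-- ===== VERDICT (by name: the statement is the Claim_ definition above) =====
theorem get_queen_dir_spec : Claim_equal_get_queen_dir := by
  intro diff _
  obtain ⟨dx, dy⟩ := diff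
  show get_queen_dir (dx, dy) = get_queen_dir_alt (dx, dy)
  unfold get_queen_dir get_queen_dir_alt
  simp only [cells_eval]
  rcases sign_cases dx with hx | hx | hx <;> rcases sign_cases dy with hy | hy | hy <;>
    · have hdx0 : (if dx > 0 then (1:Int) else 0) - (if dx < 0 then 1 else 0) = pySign dx := by
        unfold pySign; split_ifs <;> omega
      have hdy0 : (if dy > 0 then (1:Int) else 0) - (if dy < 0 then 1 else 0) = pySign dy := by
        unfold pySign; split_ifs <;> omega
      simp only [loopA, hx, hy, hdx0, hdy0]
      norm_num
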